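-- pv_equiv track=rewrite | github.com/SpongeBob90/HerbsARM | app01/mining_adv.py | findFSet
-- ===== SOURCE A (Python) =====
-- import itertools
--
-- def findFSet(recipeTrans, items, w4herblist, size, sup):
--     setDict = {}
--     fset = {}
--     flag=True
--     candiSet = list(getCandidate(items,size))
--     for i in range(0, len(candiSet)):
--         setDict[candiSet[i]]=0
--     for i in range(0, len(recipeTrans)):
--         recipe=recipeTrans[i]
--         for j in range(0,len(candiSet)):
--             candidate=candiSet[j]
--             if set(candidate)<=set(recipe):
--                 w4herb=w4herblist[i]
--                 for item in candidate:
--                     if int(w4herb[recipe.index(item)])==1: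
--                         setDict[candidate]+=1
--                         flag=False
--                         break
--                 if flag:
--                     setDict[candidate]+=2
--             flag=True
--     for herbset in setDict:
--         if setDict[herbset]>=sup:
--             fset[herbset]=setDict[herbset]
--     return fset
--
-- def getCandidate(items, len):
--     candiSet = itertools.combinations(items, len)
--     return candiSet
-- ===== SOURCE B (Python) =====
-- from itertools import combinations
--
-- def findFSet(recipeTrans, items, w4herblist, size, sup):
--     # Per transaction, enumerate only the candidate combinations actually contained in
--     # the recipe (combinations of the items present), instead of testing every global
--     # candidate against every recipe.  The weight test is the same lazy short-circuit
--     # scan as the original (any() over the candidate in order).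
--     counts = {}
--     for recipe, w4herb in zip(recipeTrans, w4herblist):
--         rset = set(recipe)
--         present = [x for x in items if x in rset]
--         if len(present) < size:
--             continue
--         for cand in combinations(present, size):
--             hit = any(int(w4herb[recipe.index(x)]) == 1 for x in cand)
--             counts[cand] = counts.get(cand, 0) + (1 if hit else 2)
--     fset = {}
--     for cand in combinations(items, size):
--         total = counts.get(cand, 0)
--         if total >= sup:
--             fset[cand] = total
--     return fset
-- ===== Notes on version B (the rewrite author's own statement) =====
-- stated objective: faster
-- what changed: Instead of testing every global candidate combination against every recipe, B enumerates per transaction only the combinations of the items present in that recipe, accumulating counts in one dict and emitting the final dict in one pass over the global candidate order; the weight test is the same lazy short-circuit any() scan as A's, so B returns A's value wherever A returns.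
import Mathlib
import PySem

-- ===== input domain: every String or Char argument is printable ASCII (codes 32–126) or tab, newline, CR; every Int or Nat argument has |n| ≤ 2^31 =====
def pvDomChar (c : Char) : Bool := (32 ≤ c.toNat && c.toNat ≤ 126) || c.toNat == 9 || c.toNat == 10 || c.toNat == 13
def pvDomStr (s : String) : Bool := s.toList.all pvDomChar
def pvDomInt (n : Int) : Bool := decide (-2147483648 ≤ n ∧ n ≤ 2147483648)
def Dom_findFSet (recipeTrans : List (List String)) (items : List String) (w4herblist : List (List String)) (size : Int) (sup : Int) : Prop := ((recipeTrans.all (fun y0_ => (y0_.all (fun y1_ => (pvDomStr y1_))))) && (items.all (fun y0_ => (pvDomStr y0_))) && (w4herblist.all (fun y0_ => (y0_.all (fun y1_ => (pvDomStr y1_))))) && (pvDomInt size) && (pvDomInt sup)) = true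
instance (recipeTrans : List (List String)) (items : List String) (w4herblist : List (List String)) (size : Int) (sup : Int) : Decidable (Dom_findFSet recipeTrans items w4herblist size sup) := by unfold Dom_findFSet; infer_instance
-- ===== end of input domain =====

-- B replaces A's per-transaction scan over ALL global candidates by enumerating only the
-- combinations of the items actually present in each recipe, with the same lazy
-- short-circuit weight scan as A (objective: faster).
-- Equivalence is about the RETURN value; neither version mutates arguments.

-- itertools.combinations(l, n): tuples of elements at strictly increasing positions,
-- in lexicographic position order (shared library helper of both ports)
def pyCombinations : Nat → List String → List (List String)
  | 0, _ => [[]]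
  | _ + 1, [] => []
  | n + 1, x :: xs => (pyCombinations n xs).map (fun c => x :: c) ++ pyCombinations (n + 1) xs

-- ===== PORT A =====
-- the inner 'for item in candidate: if int(w4herb[recipe.index(item)])==1: …; break' scan
def scanA (recipe w4herb : List String) : List String → Bool
  | [] => false
  | item :: rest =>
    if PySem.Int.ofStr? (PySem.List.pyGetD w4herb (((PySem.List.index? recipe item).getD 0 : Nat) : Int) "") == some 1
    then true
    else scanA recipe w4herb rest

def findFSet (recipeTrans : List (List String)) (items : List String) (w4herblist : List (List String)) (size : Int) (sup : Int) : List (List String × Int) :=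
  let candiSet := pyCombinations size.toNat items
  let setDict0 : PySem.Dict (List String) Int :=
    (PySem.List.pyRange 0 (candiSet.length : Int) 1).foldl
      (fun d i => d.insert (PySem.List.pyGetD candiSet i []) 0) PySem.Dict.empty
  let setDict :=
    (PySem.List.pyRange 0 (recipeTrans.length : Int) 1).foldl
      (fun d i =>
        let recipe := PySem.List.pyGetD recipeTrans i []
        (PySem.List.pyRange 0 (candiSet.length : Int) 1).foldl
          (fun d j =>
            let candidate := PySem.List.pyGetD candiSet j []
            if PySem.Set.issubset (PySem.Set.ofList candidate) (PySem.Set.ofList recipe) then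
              let w4herb := PySem.List.pyGetD w4herblist i []
              if scanA recipe w4herb candidate then
                d.insert candidate (d.getD candidate 0 + 1)
              else
                d.insert candidate (d.getD candidate 0 + 2)
            else d)
          d)
      setDict0
  let fset : PySem.Dict (List String) Int :=
    setDict.keys.foldl
      (fun f herbset =>
        if sup ≤ setDict.getD herbset 0 then f.insert herbset (setDict.getD herbset 0) else f)
      PySem.Dict.empty
  fset.items

-- ===== PORT B =====
def findFSet_alt (recipeTrans : List (List String)) (items : List String) (w4herblist : List (List String)) (size : Int) (sup : Int) : List (List String × Int) :=
  let counts : PySem.Dict (List String) Int :=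
    (recipeTrans.zip w4herblist).foldl
      (fun counts rw =>
        let recipe := rw.1
        let w4herb := rw.2
        let rset := PySem.Set.ofList recipe
        let present := items.filter (fun x => PySem.Set.contains rset x)
        if (present.length : Int) < size then counts else
        (pyCombinations size.toNat present).foldl
          (fun d cand =>
            let hit := cand.any (fun x =>
              PySem.Int.ofStr? (PySem.List.pyGetD w4herb (((PySem.List.index? recipe x).getD 0 : Nat) : Int) "") == some 1)
            d.insert cand (d.getD cand 0 + if hit then 1 else 2))
          counts)
      PySem.Dict.empty
  let fset : PySem.Dict (List String) Int :=
    (pyCombinations size.toNat items).foldl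
      (fun f cand =>
        let total := counts.getD cand 0
        if sup ≤ total then f.insert cand total else f)
      PySem.Dict.empty
  fset.items

-- ===== PRECONDITION & SPEC =====
-- Pre_ excludes inputs where Python A raises (negative size: ValueError; a weight row missing
-- for a recipe hosting a candidate: IndexError; a weight read the scan reaches failing int():
-- ValueError); it is stated conservatively (all weight entries at shared-item positions of
-- hostable recipes must be well-formed), so it also excludes some inputs where A's lazy scan
-- short-circuits before a bad entry and returns — on all such inputs B returns A's exact value.
def Pre_findFSet (recipeTrans : List (List String)) (items : List String) (w4herblist : List (List String)) (size : Int) (sup : Int) : Prop :=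
  0 ≤ size ∧
  (∀ p ∈ recipeTrans.drop w4herblist.length,
    ((items.filter (fun x => decide (x ∈ p))).length : Int) < size) ∧
  ∀ p ∈ recipeTrans.zip w4herblist,
    size ≤ ((items.filter (fun x => decide (x ∈ p.1))).length : Int) →
    ∀ x ∈ items, x ∈ p.1 →
      ((PySem.List.index? p.1 x).getD 0) < p.2.length ∧
        (PySem.Int.ofStr? (p.2.getD ((PySem.List.index? p.1 x).getD 0) "")).isSome
instance (recipeTrans : List (List String)) (items : List String) (w4herblist : List (List String)) (size : Int) (sup : Int) : Decidable (Pre_findFSet recipeTrans items w4herblist size sup) := by unfold Pre_findFSet; infer_instance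

def pvWitness_findFSet : List (List String) × List String × List (List String) × Int × Int :=
  ([["a", "b"], ["b"]], ["a", "b"], [["1", "0"], ["2"]], 1, 1)

def Spec_findFSet (recipeTrans : List (List String)) (items : List String) (w4herblist : List (List String)) (size : Int) (sup : Int) (out : List (List String × Int)) : Prop := out = findFSet_alt recipeTrans items w4herblist size sup
instance (recipeTrans : List (List String)) (items : List String) (w4herblist : List (List String)) (size : Int) (sup : Int) (out : List (List String × Int)) : Decidable (Spec_findFSet recipeTrans items w4herblist size sup out) := by unfold Spec_findFSet; infer_instance

-- ===== CLAIM (what is proved, stated in full; the proofs are below) =====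
def Claim_equal_findFSet : Prop := ∀ (recipeTrans : List (List String)) (items : List String) (w4herblist : List (List String)) (size : Int) (sup : Int), Dom_findFSet recipeTrans items w4herblist size sup → Pre_findFSet recipeTrans items w4herblist size sup → Spec_findFSet recipeTrans items w4herblist size sup (findFSet recipeTrans items w4herblist size sup)

-- ===== LEMMAS AND PROOFS =====

-- the weight test both programs apply to one item of a candidate
def predW (recipe w4herb : List String) (x : String) : Bool :=
  PySem.Int.ofStr? (PySem.List.pyGetD w4herb (((PySem.List.index? recipe x).getD 0 : Nat) : Int) "") == some 1

-- the amount one transaction (recipe, w4herb) adds to a candidate's counter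
def incW (recipe w4herb : List String) (c : List String) : Int :=
  if c.any (predW recipe w4herb) then 1 else 2

def hW (recipe w4herb : List String) (c : List String) : Int :=
  if c.all (fun x => decide (x ∈ recipe)) then incW recipe w4herb c else 0

-- total counter value of candidate c over all transactions
def totalW (pairs : List (List String × List String)) (cands : List (List String)) (c : List String) : Int :=
  (pairs.map (fun p => (cands.count c : Int) * hW p.1 p.2 c)).sum

-- the common canonical value of both programs
def canonF (recipeTrans : List (List String)) (items : List String) (w4herblist : List (List String)) (size : Int) (sup : Int) : List (List String × Int) :=
  let cands := pyCombinations size.toNat items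
  let pairs := recipeTrans.zip w4herblist
  ((PySem.List.dedup cands).filter (fun c => decide (sup ≤ totalW pairs cands c))).map
    (fun c => (c, totalW pairs cands c))

theorem scanA_eq_any (recipe w4herb : List String) (c : List String) :
    scanA recipe w4herb c = c.any (predW recipe w4herb) := by
  induction c with
  | nil => rfl
  | cons x rest ih =>
    rw [List.any_cons, ← ih]
    show (if (predW recipe w4herb x) = true then true else scanA recipe w4herb rest)
        = (predW recipe w4herb x || scanA recipe w4herb rest)
    by_cases h : predW recipe w4herb x = true <;> simp [h]

theorem combos_filter (p : String → Bool) (l : List String) (n : Nat) :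
    pyCombinations n (l.filter p) = (pyCombinations n l).filter (fun c => c.all p) := by
  induction l generalizing n with
  | nil => cases n <;> simp [pyCombinations]
  | cons x xs ih =>
    cases n with
    | zero => simp [pyCombinations]
    | succ m =>
      by_cases hp : p x = true
      · simp only [List.filter_cons, hp, if_pos, pyCombinations, ih,
          List.filter_append, List.filter_map]
        congr 1
        congr 1
        apply List.filter_congr
        intro c _
        simp [hp]
      · simp only [List.filter_cons, hp]
        simp only [pyCombinations, ih, List.filter_append, List.filter_map]
        have : ((fun c => List.all c p) ∘ fun c => x :: c) = fun _ => false := by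
          funext c; simp [hp]
        rw [this]
        simp [pyCombinations, ih]

theorem getD_foldl_insert_addv (v : List String → Int) (M : List (List String))
    (d : PySem.Dict (List String) Int) (y : List String) :
    (M.foldl (fun d c => d.insert c (d.getD c 0 + v c)) d).getD y 0
      = d.getD y 0 + (M.count y : Int) * v y := by
  induction M generalizing d with
  | nil => simp
  | cons c M' ih =>
    simp only [List.foldl_cons, ih, PySem.Dict.getD_insert]
    by_cases hyc : y = c
    · subst hyc
      simp only [List.count_cons_self]
      push_cast
      ring_nf
    · have hcy : ¬(c = y) := fun h => hyc h.symm
      simp only [List.count_cons]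
      simp [hyc, hcy]

theorem getD_mapDict (L : List (List String)) (hL : L.Nodup) (f : List String → Int)
    (c : List String) (hc : c ∈ L) :
    (PySem.Dict.mk (L.map (fun c => (c, f c)))).getD c 0 = f c := by
  apply PySem.Dict.getD_of_mem_items
  · exact List.mem_map_of_mem hc
  · simp only [PySem.Dict.keys]
    rw [List.map_map]
    rw [show ((fun (x : List String × Int) => x.1) ∘ fun c => (c, f c)) = (fun c => c) from rfl]
    rw [List.map_id']
    exact hL

theorem contains_mapDict (L : List (List String)) (f : List String → Int)
    (c : List String) (hc : c ∈ L) :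
    (PySem.Dict.mk (L.map (fun c => (c, f c)))).contains c = true := by
  rw [PySem.Dict.contains_iff_mem_keys]
  simp only [PySem.Dict.keys]
  simpa using hc

theorem insert_mapDict (L : List (List String)) (f : List String → Int)
    (c : List String) (hc : c ∈ L) (v : Int) :
    (PySem.Dict.mk (L.map (fun c => (c, f c)))).insert c v
      = PySem.Dict.mk (L.map (fun c' => (c', if c' = c then v else f c'))) := by
  apply PySem.Dict.ext
  rw [PySem.Dict.items_insert_of_contains]
  case h => exact contains_mapDict L f c hc
  show (L.map _).map _ = _
  rw [List.map_map]
  apply List.map_congr_left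
  intro a _
  by_cases hac : a = c
  · subst hac; simp
  · simp [hac]

-- A's guarded per-candidate update
def stepA (r w : List String) (d : PySem.Dict (List String) Int) (c : List String) :
    PySem.Dict (List String) Int :=
  if c.all (fun x => decide (x ∈ r)) then d.insert c (d.getD c 0 + incW r w c) else d

theorem foldl_stepA (r w : List String) (L : List (List String)) (hL : L.Nodup)
    (M : List (List String)) (hM : ∀ c ∈ M, c ∈ L) (f : List String → Int) :
    (M.foldl (stepA r w) (PySem.Dict.mk (L.map (fun c => (c, f c))))).items
      = L.map (fun c => (c, f c + (M.count c : Int) * hW r w c)) := by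
  induction M generalizing f with
  | nil =>
    simp only [List.foldl_nil]
    show L.map _ = _
    apply List.map_congr_left
    intro a _
    simp
  | cons c M' ih =>
    have hcL : c ∈ L := hM c List.mem_cons_self
    have hM' : ∀ c' ∈ M', c' ∈ L := fun c' h => hM c' (List.mem_cons_of_mem _ h)
    rw [List.foldl_cons]
    by_cases hsub : c.all (fun x => decide (x ∈ r)) = true
    · have hstep : stepA r w (PySem.Dict.mk (L.map (fun c => (c, f c)))) c
          = PySem.Dict.mk (L.map (fun c' => (c', if c' = c then f c + incW r w c else f c'))) := by
        unfold stepA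
        rw [if_pos hsub, getD_mapDict L hL f c hcL, insert_mapDict L f c hcL]
      rw [hstep, ih hM']
      apply List.map_congr_left
      intro a _
      by_cases hac : a = c
      · subst hac
        simp only [if_pos rfl, List.count_cons_self, hW, if_pos hsub]
        push_cast; ring_nf
      · have hca : ¬(c = a) := fun h => hac h.symm
        simp only [if_neg hac, List.count_cons]
        simp [hac]
        left; exact hca
    · have hstep : stepA r w (PySem.Dict.mk (L.map (fun c => (c, f c)))) c
          = PySem.Dict.mk (L.map (fun c => (c, f c))) := by
        unfold stepA
        rw [if_neg hsub]
      rw [hstep, ih hM']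
      apply List.map_congr_left
      intro a _
      by_cases hac : a = c
      · subst hac
        simp [hW, hsub, List.count_cons_self]
      · have hca : ¬(c = a) := fun h => hac h.symm
        simp only [List.count_cons]
        simp [hca]

theorem foldl_insert_dedup (P : List String → Bool) (v : List String → Int)
    (M : List (List String)) : ∀ (S : List (List String)), S.Nodup →
    (M.foldl (fun f c => if P c then f.insert c (v c) else f)
        (PySem.Dict.mk ((S.filter P).map (fun c => (c, v c))))).items
      = ((PySem.Set.update S M).filter P).map (fun c => (c, v c)) := by
  induction M with
  | nil =>
    intro S hS
    simp [PySem.Set.update]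
  | cons c M' ih =>
    intro S hS
    rw [List.foldl_cons]
    rw [show PySem.Set.update S (c :: M') = PySem.Set.update (PySem.Set.add S c) M' from rfl]
    by_cases hcS : c ∈ S
    · rw [PySem.Set.add_of_mem hcS]
      by_cases hP : P c = true
      · rw [if_pos hP]
        have hcont : (PySem.Dict.mk ((S.filter P).map (fun c => (c, v c)))).contains c = true := by
          rw [PySem.Dict.contains_iff_mem_keys]
          simp only [PySem.Dict.keys, List.map_map]
          rw [show ((fun (x : List String × Int) => x.1) ∘ fun c => (c, v c)) = (fun c => c) from rfl]
          rw [List.map_id']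
          exact List.mem_filter.2 ⟨hcS, hP⟩
        have heq : (PySem.Dict.mk ((S.filter P).map (fun c => (c, v c)))).insert c (v c)
            = PySem.Dict.mk ((S.filter P).map (fun c => (c, v c))) := by
          apply PySem.Dict.ext
          rw [PySem.Dict.items_insert_of_contains]
          case h => exact hcont
          show ((S.filter P).map _).map _ = _
          rw [List.map_map]
          apply List.map_congr_left
          intro a _
          by_cases hac : a = c
          · subst hac; simp
          · simp [hac]
        rw [heq, ih S hS]
      · rw [if_neg hP, ih S hS]
    · rw [PySem.Set.add_of_not_mem hcS]
      have hS' : (S ++ [c]).Nodup := by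
        simp only [List.nodup_append, hS, true_and, List.nodup_cons, List.not_mem_nil,
          not_false_iff, List.nodup_nil, and_true]
        intro a ha b hb
        rw [List.mem_singleton] at hb
        subst hb
        exact fun h => hcS (h ▸ ha)
      by_cases hP : P c = true
      · rw [if_pos hP]
        have hncont : (PySem.Dict.mk ((S.filter P).map (fun c => (c, v c)))).contains c = false := by
          rw [← Bool.not_eq_true, PySem.Dict.contains_iff_mem_keys]
          simp only [PySem.Dict.keys, List.map_map]
          rw [show ((fun (x : List String × Int) => x.1) ∘ fun c => (c, v c)) = (fun c => c) from rfl]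
          rw [List.map_id']
          intro hmem
          exact hcS (List.mem_filter.1 hmem).1
        have heq : (PySem.Dict.mk ((S.filter P).map (fun c => (c, v c)))).insert c (v c)
            = PySem.Dict.mk (((S ++ [c]).filter P).map (fun c => (c, v c))) := by
          apply PySem.Dict.ext
          rw [PySem.Dict.items_insert_of_not_contains]
          case h => exact hncont
          show ((S.filter P).map _) ++ [(c, v c)] = _
          rw [List.filter_append, List.map_append]
          simp [hP]
        rw [heq, ih _ hS']
      · rw [if_neg hP]
        have hfe : (S ++ [c]).filter P = S.filter P := by
          rw [List.filter_append]
          simp [hP]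
        rw [← hfe]
        exact ih _ hS'

theorem contains_ofList_eq (r : List String) (x : String) :
    PySem.Set.contains (PySem.Set.ofList r) x = decide (x ∈ r) := by
  by_cases h : x ∈ r <;> simp [PySem.Set.mem_ofList, h]

theorem totalW_of_not_mem (pairs : List (List String × List String))
    (cands : List (List String)) (y : List String) (hy : y ∉ cands) :
    totalW pairs cands y = 0 := by
  unfold totalW
  rw [List.count_eq_zero_of_not_mem hy]
  simp

theorem combos_nil (n : Nat) (l : List String) (h : l.length < n) :
    pyCombinations n l = [] := by
  induction l generalizing n with
  | nil =>
    cases n with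
    | zero => omega
    | succ m => rfl
  | cons x xs ih =>
    cases n with
    | zero => omega
    | succ m =>
      show (pyCombinations m xs).map _ ++ pyCombinations (m + 1) xs = []
      rw [ih m (by simpa using h), ih (m + 1) (by simp at h; omega)]
      rfl

-- one transaction of B's counting loop
theorem innerB_getD (items : List String) (size : Int) (r w : List String)
    (d : PySem.Dict (List String) Int) (y : List String) :
    (if ((items.filter (fun x => PySem.Set.contains (PySem.Set.ofList r) x)).length : Int) < size then d else
      ((pyCombinations size.toNat (items.filter (fun x => PySem.Set.contains (PySem.Set.ofList r) x))).foldl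
        (fun d c => d.insert c (d.getD c 0 +
          if c.any (fun x => PySem.Int.ofStr? (PySem.List.pyGetD w (((PySem.List.index? r x).getD 0 : Nat) : Int) "") == some 1) then 1 else 2)) d)).getD y 0
      = d.getD y 0 + ((pyCombinations size.toNat items).count y : Int) * hW r w y := by
  have hpres : (fun x => PySem.Set.contains (PySem.Set.ofList r) x)
      = (fun x => decide (x ∈ r)) := funext (contains_ofList_eq r)
  rw [hpres]
  by_cases hg : (((items.filter (fun x => decide (x ∈ r))).length : Int) < size)
  · rw [if_pos hg]
    have hzero : ((pyCombinations size.toNat items).count y : Int) * hW r w y = 0 := by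
      by_cases hall : (y.all (fun x => decide (x ∈ r))) = true
      · have hcount : (pyCombinations size.toNat items).count y = 0 := by
          rw [List.count_eq_zero]
          intro hy
          have h1 : y ∈ (pyCombinations size.toNat items).filter
              (fun c => c.all (fun x => decide (x ∈ r))) := List.mem_filter.2 ⟨hy, hall⟩
          rw [← combos_filter] at h1
          rw [combos_nil _ _ (by omega)] at h1
          exact absurd h1 (List.not_mem_nil)
        rw [hcount]
        simp
      · unfold hW
        rw [if_neg hall]
        simp
    rw [hzero]
    simp
  · rw [if_neg hg]
    rw [combos_filter]
    rw [show (fun (d : PySem.Dict (List String) Int) c => d.insert c (d.getD c 0 +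
          if (c.any fun x => PySem.Int.ofStr? (PySem.List.pyGetD w (((PySem.List.index? r x).getD 0 : Nat) : Int) "") == some 1) = true then (1:Int) else 2))
        = (fun d c => d.insert c (d.getD c 0 + incW r w c)) from rfl]
    rw [getD_foldl_insert_addv (incW r w)]
    congr 1
    by_cases hall : (y.all (fun x => decide (x ∈ r))) = true
    · rw [List.count_filter (p := fun c => List.all c (fun x => decide (x ∈ r))) hall]
      unfold hW
      rw [if_pos hall]
    · have hnm : y ∉ List.filter (fun c => List.all c (fun x => decide (x ∈ r))) (pyCombinations size.toNat items) :=
        fun hmem => hall (List.mem_filter.1 hmem).2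
      rw [List.count_eq_zero_of_not_mem hnm]
      unfold hW
      rw [if_neg hall]
      simp

theorem countsB_getD (items : List String) (size : Int)
    (pairs : List (List String × List String)) (d : PySem.Dict (List String) Int)
    (y : List String) :
    (pairs.foldl (fun counts rw =>
        if ((items.filter (fun x => PySem.Set.contains (PySem.Set.ofList rw.1) x)).length : Int) < size then counts else
        (pyCombinations size.toNat (items.filter (fun x => PySem.Set.contains (PySem.Set.ofList rw.1) x))).foldl
          (fun d c => d.insert c (d.getD c 0 +
            if c.any (fun x => PySem.Int.ofStr? (PySem.List.pyGetD rw.2 (((PySem.List.index? rw.1 x).getD 0 : Nat) : Int) "") == some 1) then 1 else 2)) counts) d).getD y 0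
      = d.getD y 0 + totalW pairs (pyCombinations size.toNat items) y := by
  induction pairs generalizing d with
  | nil => simp [totalW]
  | cons p ps ih =>
    rw [List.foldl_cons, ih, innerB_getD]
    unfold totalW
    rw [List.map_cons, List.sum_cons]
    ring

-- the shared final pass: keep candidates (in dedup order) whose total reaches sup
theorem finalPass (cands : List (List String)) (g : List String → Int) (sup : Int)
    (d : PySem.Dict (List String) Int) (hd : ∀ y, d.getD y 0 = g y) :
    (cands.foldl (fun f c => if sup ≤ d.getD c 0 then f.insert c (d.getD c 0) else f)
        PySem.Dict.empty).items
      = ((PySem.List.dedup cands).filter (fun c => decide (sup ≤ g c))).map (fun c => (c, g c)) := by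
  have hfun : (fun (f : PySem.Dict (List String) Int) c =>
        if sup ≤ d.getD c 0 then f.insert c (d.getD c 0) else f)
      = (fun f c => if (fun c => decide (sup ≤ g c)) c then f.insert c (g c) else f) := by
    funext f c
    rw [hd c]
    by_cases h : sup ≤ g c <;> simp [h]
  rw [hfun]
  have h := foldl_insert_dedup (fun c => decide (sup ≤ g c)) g cands [] List.nodup_nil
  rw [show (PySem.Dict.mk ((([] : List (List String)).filter (fun c => decide (sup ≤ g c))).map
      (fun c => (c, g c)))) = PySem.Dict.empty from rfl] at h
  rw [h]
  rw [show PySem.Set.update ([] : List (List String)) cands = PySem.Set.ofList cands from rfl]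
  rw [PySem.List.dedup_eq_ofList]

theorem issubset_ofList_eq (c r : List String) :
    (PySem.Set.ofList c).issubset (PySem.Set.ofList r) = c.all (fun x => decide (x ∈ r)) := by
  rw [Bool.eq_iff_iff]
  simp [PySem.Set.issubset_iff, PySem.Set.mem_ofList, List.all_eq_true]

theorem foldl_insert_all (v : List String → Int) (M : List (List String)) :
    ∀ (S : List (List String)), S.Nodup →
    M.foldl (fun f c => f.insert c (v c)) (PySem.Dict.mk (S.map (fun c => (c, v c))))
      = PySem.Dict.mk ((PySem.Set.update S M).map (fun c => (c, v c))) := by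
  induction M with
  | nil =>
    intro S hS
    rfl
  | cons c M' ih =>
    intro S hS
    rw [List.foldl_cons]
    rw [show PySem.Set.update S (c :: M') = PySem.Set.update (PySem.Set.add S c) M' from rfl]
    by_cases hcS : c ∈ S
    · rw [PySem.Set.add_of_mem hcS]
      have hcont : (PySem.Dict.mk (S.map (fun c => (c, v c)))).contains c = true := by
        rw [PySem.Dict.contains_iff_mem_keys]
        simp only [PySem.Dict.keys, List.map_map]
        rw [show ((fun (x : List String × Int) => x.1) ∘ fun c => (c, v c)) = (fun c => c) from rfl]
        rw [List.map_id']
        exact hcS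
      have heq : (PySem.Dict.mk (S.map (fun c => (c, v c)))).insert c (v c)
          = PySem.Dict.mk (S.map (fun c => (c, v c))) := by
        apply PySem.Dict.ext
        rw [PySem.Dict.items_insert_of_contains]
        case h => exact hcont
        show (S.map _).map _ = _
        rw [List.map_map]
        apply List.map_congr_left
        intro a _
        by_cases hac : a = c
        · subst hac; simp
        · simp [hac]
      rw [heq, ih S hS]
    · rw [PySem.Set.add_of_not_mem hcS]
      have hS' : (S ++ [c]).Nodup := by
        simp only [List.nodup_append, hS, true_and, List.nodup_cons, List.not_mem_nil,
          not_false_iff, List.nodup_nil, and_true]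
        intro a ha b hb
        rw [List.mem_singleton] at hb
        subst hb
        exact fun h => hcS (h ▸ ha)
      have hncont : (PySem.Dict.mk (S.map (fun c => (c, v c)))).contains c = false := by
        rw [← Bool.not_eq_true, PySem.Dict.contains_iff_mem_keys]
        simp only [PySem.Dict.keys, List.map_map]
        rw [show ((fun (x : List String × Int) => x.1) ∘ fun c => (c, v c)) = (fun c => c) from rfl]
        rw [List.map_id']
        exact hcS
      have heq : (PySem.Dict.mk (S.map (fun c => (c, v c)))).insert c (v c)
          = PySem.Dict.mk ((S ++ [c]).map (fun c => (c, v c))) := by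
        apply PySem.Dict.ext
        rw [PySem.Dict.items_insert_of_not_contains]
        case h => exact hncont
        show (S.map _) ++ [(c, v c)] = _
        rw [List.map_append]
        rfl
      rw [heq, ih _ hS']

theorem foldl_pairsA (cands L : List (List String)) (hL : L.Nodup)
    (hM : ∀ c ∈ cands, c ∈ L) (pairs : List (List String × List String))
    (f : List String → Int) :
    pairs.foldl (fun d p => cands.foldl (stepA p.1 p.2) d)
        (PySem.Dict.mk (L.map (fun c => (c, f c))))
      = PySem.Dict.mk (L.map (fun c => (c, f c + totalW pairs cands c))) := by
  induction pairs generalizing f with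
  | nil =>
    apply PySem.Dict.ext
    show L.map _ = L.map _
    apply List.map_congr_left
    intro a _
    simp [totalW]
  | cons p ps ih =>
    rw [List.foldl_cons]
    have hstep : cands.foldl (stepA p.1 p.2) (PySem.Dict.mk (L.map (fun c => (c, f c))))
        = PySem.Dict.mk (L.map (fun c => (c, f c + (cands.count c : Int) * hW p.1 p.2 c))) := by
      apply PySem.Dict.ext
      exact foldl_stepA p.1 p.2 L hL cands hM f
    rw [hstep, ih]
    apply PySem.Dict.ext
    show L.map _ = L.map _
    apply List.map_congr_left
    intro a _
    unfold totalW
    rw [List.map_cons, List.sum_cons]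
    simp only [Prod.mk.injEq, true_and]
    ring

theorem innerA_convert (r w : List String) (cands : List (List String))
    (acc : PySem.Dict (List String) Int) :
    List.foldl
      (fun d j =>
        if (PySem.Set.ofList (PySem.List.pyGetD cands j [])).issubset (PySem.Set.ofList r) = true then
          if scanA r w (PySem.List.pyGetD cands j []) = true then
            d.insert (PySem.List.pyGetD cands j []) (d.getD (PySem.List.pyGetD cands j []) 0 + 1)
          else d.insert (PySem.List.pyGetD cands j []) (d.getD (PySem.List.pyGetD cands j []) 0 + 2)
        else d)
      acc (PySem.List.pyRange 0 (cands.length : Int) 1)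
      = cands.foldl (stepA r w) acc := by
  rw [← PySem.List.foldl_pyRange_zero_pyGetD' cands ([] : List String) (stepA r w) acc]
  apply PySem.List.foldl_congr_mem'
  intro j hj acc2
  generalize PySem.List.pyGetD cands j ([] : List String) = c
  unfold stepA incW
  rw [issubset_ofList_eq, scanA_eq_any]
  by_cases h1 : c.all (fun x => decide (x ∈ r)) = true <;>
    by_cases h2 : c.any (predW r w) = true <;> simp [h1, h2]

theorem setDictA_eq (rT : List (List String)) (items : List String)
    (wL : List (List String)) (size : Int) (hsize : 0 ≤ size)
    (htail : ∀ p ∈ rT.drop wL.length,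
      ((items.filter (fun x => decide (x ∈ p))).length : Int) < size) :
    List.foldl
        (fun d i =>
          List.foldl
            (fun d j =>
              if (PySem.Set.ofList (PySem.List.pyGetD (pyCombinations size.toNat items) j [])).issubset
                  (PySem.Set.ofList (PySem.List.pyGetD rT i [])) = true then
                if scanA (PySem.List.pyGetD rT i []) (PySem.List.pyGetD wL i [])
                    (PySem.List.pyGetD (pyCombinations size.toNat items) j []) = true then
                  d.insert (PySem.List.pyGetD (pyCombinations size.toNat items) j [])
                    (d.getD (PySem.List.pyGetD (pyCombinations size.toNat items) j []) 0 + 1)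
                else
                  d.insert (PySem.List.pyGetD (pyCombinations size.toNat items) j [])
                    (d.getD (PySem.List.pyGetD (pyCombinations size.toNat items) j []) 0 + 2)
              else d)
            d (PySem.List.pyRange 0 ((pyCombinations size.toNat items).length : Int) 1))
        (List.foldl (fun d i => d.insert (PySem.List.pyGetD (pyCombinations size.toNat items) i []) 0)
          PySem.Dict.empty (PySem.List.pyRange 0 ((pyCombinations size.toNat items).length : Int) 1))
        (PySem.List.pyRange 0 (rT.length : Int) 1)
      = PySem.Dict.mk ((PySem.Set.ofList (pyCombinations size.toNat items)).map
          (fun c => (c, totalW (rT.zip wL) (pyCombinations size.toNat items) c))) := by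
  have hinit : List.foldl (fun (d : PySem.Dict (List String) Int) i =>
        d.insert (PySem.List.pyGetD (pyCombinations size.toNat items) i []) 0)
        PySem.Dict.empty (PySem.List.pyRange 0 ((pyCombinations size.toNat items).length : Int) 1)
      = PySem.Dict.mk ((PySem.Set.ofList (pyCombinations size.toNat items)).map (fun c => (c, 0))) := by
    rw [PySem.List.foldl_pyRange_zero_pyGetD' (pyCombinations size.toNat items) ([] : List String)
      (fun (d : PySem.Dict (List String) Int) c => d.insert c 0) PySem.Dict.empty]
    have h := foldl_insert_all (fun _ => (0 : Int)) (pyCombinations size.toNat items) [] List.nodup_nil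
    rw [show (PySem.Dict.mk ((([] : List (List String)).map (fun c => (c, (0:Int))))))
        = PySem.Dict.empty from rfl] at h
    rw [h]
    rfl
  rw [hinit]
  have hzlenfact : (rT.zip wL).length = min rT.length wL.length := List.length_zip
  have hpairs := foldl_pairsA (pyCombinations size.toNat items) (PySem.Set.ofList (pyCombinations size.toNat items))
    (PySem.Set.nodup_ofList _) (fun c h => ((PySem.Set.mem_ofList _ _).2 h)) (rT.zip wL) (fun _ => (0 : Int))
  simp only [zero_add] at hpairs
  rw [← hpairs]
  rw [← PySem.List.foldl_pyRange_zero_pyGetD' (rT.zip wL) (([] : List String), ([] : List String))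
    (fun d p => (pyCombinations size.toNat items).foldl (stepA p.1 p.2) d)
    (PySem.Dict.mk ((PySem.Set.ofList (pyCombinations size.toNat items)).map (fun c => (c, (0:Int)))))]
  rw [PySem.List.pyRange_one_append 0 ((rT.zip wL).length : Int) (rT.length : Int)
      (by positivity) (by push_cast [hzlenfact]; omega)]
  rw [List.foldl_append]
  refine Eq.trans (PySem.List.foldl_congr_mem' _ _ (fun acc _ => acc) _ ?_)
    (Eq.trans (List.foldl_fixed _) ?_)
  · -- the transactions beyond the weight list change nothing
    intro i hi acc
    rw [PySem.List.mem_pyRange_one] at hi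
    obtain ⟨hzli, hirt⟩ := hi
    have h0 : (0 : Int) ≤ i := le_trans (by positivity) hzli
    have hiN : i.toNat < rT.length := by omega
    have hiW : wL.length ≤ i.toNat := by omega
    rw [PySem.List.pyGetD_eq_getElem rT ([] : List String) h0 (by omega)]
    have hmemdrop : rT[i.toNat] ∈ rT.drop wL.length := by
      have hlt : i.toNat - wL.length < (rT.drop wL.length).length := by
        simp [List.length_drop]
        omega
      refine List.mem_iff_getElem.2 ⟨i.toNat - wL.length, hlt, ?_⟩
      rw [List.getElem_drop]
      congr 1
      omega
    have hflt := htail _ hmemdrop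
    have hnone : ∀ c ∈ pyCombinations size.toNat items,
        (c.all (fun x => decide (x ∈ rT[i.toNat]))) = false := by
      intro c hc
      by_contra hne
      have hall : (c.all (fun x => decide (x ∈ rT[i.toNat]))) = true := by
        revert hne
        cases (c.all (fun x => decide (x ∈ rT[i.toNat]))) <;> simp
      have h1 : c ∈ (pyCombinations size.toNat items).filter
          (fun c => c.all (fun x => decide (x ∈ rT[i.toNat]))) := List.mem_filter.2 ⟨hc, hall⟩
      rw [← combos_filter] at h1
      rw [combos_nil _ _ (by omega)] at h1
      exact absurd h1 (List.not_mem_nil)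
    refine Eq.trans (PySem.List.foldl_congr_mem' _ _ (fun acc _ => acc) _ ?_)
      (List.foldl_fixed _)
    intro j hj acc2
    rw [PySem.List.mem_pyRange_one] at hj
    rw [PySem.List.pyGetD_eq_getElem (pyCombinations size.toNat items) ([] : List String) hj.1 hj.2]
    rw [issubset_ofList_eq, hnone _ (List.getElem_mem _)]
    simp
  · -- the zipped transactions are the zip fold
    apply PySem.List.foldl_congr_mem'
    intro i hi acc
    rw [PySem.List.mem_pyRange_one] at hi
    obtain ⟨h0, hilt⟩ := hi
    have hiN : i.toNat < rT.length := by omega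
    have hiW : i.toNat < wL.length := by omega
    have hiZ : i.toNat < (rT.zip wL).length := by omega
    rw [PySem.List.pyGetD_eq_getElem (rT.zip wL) ([], []) h0 (by omega),
      List.getElem_zip]
    rw [← PySem.List.pyGetD_eq_getElem rT ([] : List String) h0 (by omega),
        ← PySem.List.pyGetD_eq_getElem wL ([] : List String) h0 (by omega)]
    generalize PySem.List.pyGetD rT i ([] : List String) = r
    generalize PySem.List.pyGetD wL i ([] : List String) = w
    exact innerA_convert r w (pyCombinations size.toNat items) acc

theorem A_characterization (recipeTrans : List (List String)) (items : List String)
    (w4herblist : List (List String)) (size : Int) (sup : Int)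
    (hsize : 0 ≤ size)
    (htail : ∀ p ∈ recipeTrans.drop w4herblist.length,
      ((items.filter (fun x => decide (x ∈ p))).length : Int) < size) :
    findFSet recipeTrans items w4herblist size sup
      = canonF recipeTrans items w4herblist size sup := by
  simp only [findFSet, canonF]
  rw [setDictA_eq recipeTrans items w4herblist size hsize htail]
  have hkeys : (PySem.Dict.mk ((PySem.Set.ofList (pyCombinations size.toNat items)).map
      (fun c => (c, totalW (recipeTrans.zip w4herblist) (pyCombinations size.toNat items) c)))).keys
      = PySem.Set.ofList (pyCombinations size.toNat items) := by
    simp only [PySem.Dict.keys, List.map_map]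
    rw [show ((fun (x : List String × Int) => x.1) ∘ fun c =>
        (c, totalW (recipeTrans.zip w4herblist) (pyCombinations size.toNat items) c)) = (fun c => c) from rfl]
    exact List.map_id' _
  rw [hkeys]
  have hd : ∀ y, (PySem.Dict.mk ((PySem.Set.ofList (pyCombinations size.toNat items)).map
      (fun c => (c, totalW (recipeTrans.zip w4herblist) (pyCombinations size.toNat items) c)))).getD y 0
      = totalW (recipeTrans.zip w4herblist) (pyCombinations size.toNat items) y := by
    intro y
    by_cases hy : y ∈ PySem.Set.ofList (pyCombinations size.toNat items)
    · exact getD_mapDict _ (PySem.Set.nodup_ofList _) _ _ hy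
    · have hc : (PySem.Dict.mk ((PySem.Set.ofList (pyCombinations size.toNat items)).map
          (fun c => (c, totalW (recipeTrans.zip w4herblist) (pyCombinations size.toNat items) c)))).contains y = false := by
        rw [← Bool.not_eq_true, PySem.Dict.contains_iff_mem_keys, hkeys]
        exact hy
      rw [PySem.Dict.getD_of_not_contains _ 0 hc]
      rw [totalW_of_not_mem _ _ _ (fun h => hy ((PySem.Set.mem_ofList _ _).2 h))]
  rw [finalPass (PySem.Set.ofList (pyCombinations size.toNat items))
    (fun c => totalW (recipeTrans.zip w4herblist) (pyCombinations size.toNat items) c) sup _ hd]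
  simp only [PySem.List.dedup_eq_ofList, PySem.Set.ofList_ofList]

theorem B_characterization (recipeTrans : List (List String)) (items : List String)
    (w4herblist : List (List String)) (size : Int) (sup : Int) :
    findFSet_alt recipeTrans items w4herblist size sup
      = canonF recipeTrans items w4herblist size sup := by
  simp only [findFSet_alt, canonF]
  exact finalPass (pyCombinations size.toNat items)
    (fun c => totalW (recipeTrans.zip w4herblist) (pyCombinations size.toNat items) c) sup _
    (fun y => by rw [countsB_getD]; simp)

-- ===== VERDICT (by name: the statement is the Claim_ definition above) =====
theorem findFSet_spec : Claim_equal_findFSet := by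
  intro recipeTrans items w4herblist size sup _hDom hPre
  unfold Spec_findFSet
  rw [A_characterization recipeTrans items w4herblist size sup hPre.1 hPre.2.1,
      B_characterization]
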